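-- pv_equiv track=rewrite | github.com/SWeszler/google-kickstart | 2020_D/D2/d2.py | solution
-- ===== SOURCE A (Python) =====
-- def solution(K, notes):
--     dp = [[K for j in range(4)] for i in range(K)]
--
--     for j in range(4):
--         dp[0][j] = 0
--
--     for i in range(1, K):
--         for jp in range(4):
--             for j in range(4):
--                 violation = 1
--                 if (notes[i] > notes[i - 1] and j > jp) or (notes[i] < notes[i - 1] and j < jp) or (notes[i] == notes[i - 1] and j == jp):
--                     violation = 0
--                 dp[i][j] = min(dp[i][j], dp[i - 1][jp] + violation)
--
--     return min(dp[-1])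
-- ===== SOURCE B (Python) =====
-- def solution(K, notes):
--     # Track the interval [lo, hi] of fingers reachable without a new violation,
--     # plus the violation count v; O(K) instead of the K x 4 x 4 DP.
--     v, lo, hi = 0, 0, 3
--     for i in range(1, K):
--         if notes[i] > notes[i - 1]:
--             if lo == 3:
--                 v, lo, hi = v + 1, 0, 3
--             else:
--                 lo, hi = lo + 1, 3
--         elif notes[i] < notes[i - 1]:
--             if hi == 0:
--                 v, lo, hi = v + 1, 0, 3
--             else:
--                 lo, hi = 0, hi - 1
--     return v
-- ===== Notes on version B (the rewrite author's own statement) =====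
-- stated objective: faster
-- what changed: Replaces the K x 4 DP table over finger assignments by a single O(K) pass that keeps only the violation count and the interval [lo,hi] of fingers currently reachable at no extra cost, shrinking/shifting it per direction and resetting it (counting one violation) when it would empty.
import Mathlib
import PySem

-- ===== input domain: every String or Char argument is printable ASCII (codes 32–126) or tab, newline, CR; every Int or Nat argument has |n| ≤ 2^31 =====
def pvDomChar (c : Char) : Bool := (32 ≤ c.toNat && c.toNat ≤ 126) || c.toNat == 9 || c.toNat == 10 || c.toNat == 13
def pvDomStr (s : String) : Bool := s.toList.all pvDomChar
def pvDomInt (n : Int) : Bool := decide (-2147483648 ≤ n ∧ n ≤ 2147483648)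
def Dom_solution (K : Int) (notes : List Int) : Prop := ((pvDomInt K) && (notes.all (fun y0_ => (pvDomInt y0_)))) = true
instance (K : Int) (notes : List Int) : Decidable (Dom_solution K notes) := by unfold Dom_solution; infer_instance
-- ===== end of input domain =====

-- B replaces A's K×4 DP table by a single pass keeping only the violation count and the
-- interval [lo,hi] of fingers reachable at the current cost (O(1) state, constant-factor faster).

-- ===== PORT A =====
-- notes[i] (in range under Pre_; default 0 only pads the out-of-Pre_ totalisation)
def noteAt (notes : List Int) (i : Int) : Int := (PySem.List.pyGet? notes i).getD 0

-- dp[i][j] = v  /  dp[i][j]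
def dpSet (dp : List (List Int)) (i j : Nat) (v : Int) : List (List Int) :=
  dp.set i ((dp.getD i []).set j v)
def dpGet (dp : List (List Int)) (i j : Nat) : Int := (dp.getD i []).getD j 0

-- the body of A's 'for i in range(1, K)' loop (the two inner 'for jp/for j' loops)
def bodyA (notes : List Int) (i : Int) (dp : List (List Int)) : List (List Int) :=
  (List.range 4).foldl (fun dp jp =>
    (List.range 4).foldl (fun dp j =>
      let violation : Int :=
        if (noteAt notes i > noteAt notes (i - 1) ∧ jp < j) ∨
           (noteAt notes i < noteAt notes (i - 1) ∧ j < jp) ∨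
           (noteAt notes i = noteAt notes (i - 1) ∧ j = jp) then 0 else 1
      dpSet dp i.toNat j (min (dpGet dp i.toNat j) (dpGet dp (i - 1).toNat jp + violation))) dp) dp

def solution (K : Int) (notes : List Int) : Int :=
  let dp0 := (PySem.List.pyRange 0 K 1).map (fun _ => (PySem.List.pyRange 0 4 1).map (fun _ => K))
  let dp1 := (List.range 4).foldl (fun dp j => dpSet dp 0 j 0) dp0
  let dp2 := (PySem.List.pyRange 1 K 1).foldl (fun dp i => bodyA notes i dp) dp1
  match PySem.List.pyGet? dp2 (-1) with
  | some row => (PySem.List.min? row (fun x => x)).getD 0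
  | none => 0

-- ===== PORT B =====
-- the body of B's single loop: update (v, lo, hi) by the direction of step i
def stepB (notes : List Int) (s : Int × Int × Int) (i : Int) : Int × Int × Int :=
  if noteAt notes i > noteAt notes (i - 1) then
    (if s.2.1 = 3 then (s.1 + 1, 0, 3) else (s.1, s.2.1 + 1, 3))
  else if noteAt notes i < noteAt notes (i - 1) then
    (if s.2.2 = 0 then (s.1 + 1, 0, 3) else (s.1, 0, s.2.2 - 1))
  else s

def solution_alt (K : Int) (notes : List Int) : Int :=
  ((PySem.List.pyRange 1 K 1).foldl (stepB notes) (0, 0, 3)).1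

-- ===== PRECONDITION & SPEC =====
-- Pre_ = exactly where the Python A returns: K ≥ 1 (else dp[0]/dp[-1] raises IndexError) and,
-- for K ≥ 2, notes must have at least K entries (else notes[i] raises IndexError).
def Pre_solution (K : Int) (notes : List Int) : Prop :=
  1 ≤ K ∧ (K = 1 ∨ K ≤ notes.length)
instance (K : Int) (notes : List Int) : Decidable (Pre_solution K notes) := by
  unfold Pre_solution; infer_instance
def pvWitness_solution : Int × List Int := (3, [1, 2, 3])

def Spec_solution (K : Int) (notes : List Int) (out : Int) : Prop := out = solution_alt K notes
instance (K : Int) (notes : List Int) (out : Int) : Decidable (Spec_solution K notes out) := by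
  unfold Spec_solution; infer_instance

-- ===== CLAIM (what is proved, stated in full; the proofs are below) =====
def Claim_equal_solution : Prop := ∀ (K : Int) (notes : List Int),
  Dom_solution K notes → Pre_solution K notes → Spec_solution K notes (solution K notes)

-- ===== LEMMAS AND PROOFS =====

-- model of A's dp row i: entry j costs v, plus 1 unless j lies in [lo, hi]
def Rv (v lo hi : Int) (j : Int) : Int := v + (if lo ≤ j ∧ j ≤ hi then 0 else 1)
def rowOf (v lo hi : Int) : List Int := [Rv v lo hi 0, Rv v lo hi 1, Rv v lo hi 2, Rv v lo hi 3]

-- scratch lemmas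
lemma getD_set_self' (l : List (List Int)) (n : Nat) (a : List Int) (h : n < l.length) :
    (l.set n a).getD n [] = a := by
  simp [List.getD, h]

lemma getD_set_ne' (l : List (List Int)) (n m : Nat) (a : List Int) (h : n ≠ m) :
    (l.set n a).getD m [] = l.getD m [] := by
  simp [List.getD, List.getElem?_set_ne h]

lemma fold_set {β : Type} (L : List β) (n p : Nat) (hnp : p ≠ n)
    (g : β → List Int → List Int → List Int) :
    ∀ dp : List (List Int),
      L.foldl (fun dp x => dp.set n (g x (dp.getD p []) (dp.getD n []))) dp
        = dp.set n (L.foldl (fun cur x => g x (dp.getD p []) cur) (dp.getD n [])) := by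
  induction L with
  | nil =>
    intro dp
    simp only [List.foldl_nil]
    by_cases h : n < dp.length
    · rw [List.getD_eq_getElem dp [] h, List.set_getElem_self h]
    · rw [List.set_eq_of_length_le (by omega)]
  | cons x L ih =>
    intro dp
    simp only [List.foldl_cons]
    rw [ih]
    by_cases h : n < dp.length
    · rw [getD_set_ne' _ _ _ _ (Ne.symm hnp), List.set_set, getD_set_self' _ _ _ h]
    · have hle : dp.length ≤ n := by omega
      rw [List.set_eq_of_length_le hle, List.set_eq_of_length_le hle,
          List.set_eq_of_length_le hle]

lemma inner_fold (n p : Nat) (hnp : p ≠ n) (w : Nat → Nat → Int) (jp : Nat)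
    (dp : List (List Int)) :
    (List.range 4).foldl (fun dp j => dp.set n ((dp.getD n []).set j
        (min ((dp.getD n []).getD j 0) ((dp.getD p []).getD jp 0 + w jp j)))) dp
      = dp.set n ((List.range 4).foldl (fun cur j => cur.set j
        (min (cur.getD j 0) ((dp.getD p []).getD jp 0 + w jp j))) (dp.getD n [])) :=
  fold_set _ n p hnp (fun j prev cur => cur.set j (min (cur.getD j 0) (prev.getD jp 0 + w jp j))) dp

lemma body_fold (n p : Nat) (hnp : p ≠ n) (w : Nat → Nat → Int) (dp : List (List Int)) :
    (List.range 4).foldl (fun dp jp =>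
      (List.range 4).foldl (fun dp j => dp.set n ((dp.getD n []).set j
        (min ((dp.getD n []).getD j 0) ((dp.getD p []).getD jp 0 + w jp j)))) dp) dp
      = dp.set n ((List.range 4).foldl (fun cur jp =>
          (List.range 4).foldl (fun cur j => cur.set j
            (min (cur.getD j 0) ((dp.getD p []).getD jp 0 + w jp j))) cur) (dp.getD n [])) := by
  have h1 : (fun (dp : List (List Int)) (jp : Nat) =>
      (List.range 4).foldl (fun dp j => dp.set n ((dp.getD n []).set j
        (min ((dp.getD n []).getD j 0) ((dp.getD p []).getD jp 0 + w jp j)))) dp)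
      = (fun (dp : List (List Int)) (jp : Nat) => dp.set n
          ((fun (jp : Nat) (prev cur : List Int) => (List.range 4).foldl (fun cur j => cur.set j
            (min (cur.getD j 0) (prev.getD jp 0 + w jp j))) cur) jp (dp.getD p []) (dp.getD n []))) :=
    funext fun dp => funext fun jp => inner_fold n p hnp w jp dp
  rw [h1]
  exact fold_set _ n p hnp (fun jp prev cur => (List.range 4).foldl (fun cur j => cur.set j
    (min (cur.getD j 0) (prev.getD jp 0 + w jp j))) cur) dp

-- row-local form of A's loop body
def rowStep (a b : Int) (prev cur : List Int) : List Int :=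
  (List.range 4).foldl (fun cur jp =>
    (List.range 4).foldl (fun cur j =>
      cur.set j (min (cur.getD j 0) (prev.getD jp 0 +
        (if (a > b ∧ jp < j) ∨ (a < b ∧ j < jp) ∨ (a = b ∧ j = jp) then 0 else 1)))) cur) cur

lemma bodyA_eq (notes : List Int) (i : Int) (dp : List (List Int)) (h1 : 1 ≤ i) :
    bodyA notes i dp = dp.set i.toNat
      (rowStep (noteAt notes i) (noteAt notes (i - 1)) (dp.getD (i - 1).toNat []) (dp.getD i.toNat [])) := by
  have hnp : (i - 1).toNat ≠ i.toNat := by omega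
  simp only [bodyA, dpSet, dpGet, rowStep]
  exact body_fold i.toNat (i - 1).toNat hnp
    (fun jp j => if (noteAt notes i > noteAt notes (i - 1) ∧ jp < j) ∨
        (noteAt notes i < noteAt notes (i - 1) ∧ j < jp) ∨
        (noteAt notes i = noteAt notes (i - 1) ∧ j = jp) then 0 else 1) dp

-- B's step as a function of the two note values
def upd (a b v lo hi : Int) : Int × Int × Int :=
  if a > b then (if lo = 3 then (v + 1, 0, 3) else (v, lo + 1, 3))
  else if a < b then (if hi = 0 then (v + 1, 0, 3) else (v, 0, hi - 1))
  else (v, lo, hi)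

lemma stepB_upd (notes : List Int) (v lo hi i : Int) :
    stepB notes (v, lo, hi) i = upd (noteAt notes i) (noteAt notes (i - 1)) v lo hi := rfl

lemma upd_bounds (a b v lo hi : Int) (h0 : 0 ≤ lo) (hlh : lo ≤ hi) (h3 : hi ≤ 3) :
    0 ≤ (upd a b v lo hi).2.1 ∧ (upd a b v lo hi).2.1 ≤ (upd a b v lo hi).2.2 ∧
    (upd a b v lo hi).2.2 ≤ 3 ∧ v ≤ (upd a b v lo hi).1 ∧ (upd a b v lo hi).1 ≤ v + 1 := by
  unfold upd; split_ifs <;> simp <;> omega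


lemma range4 : List.range 4 = [0, 1, 2, 3] := rfl


set_option maxHeartbeats 4000000 in
lemma rowStep_explicit (a b p0 p1 p2 p3 c0 c1 c2 c3 : Int) :
    rowStep a b [p0, p1, p2, p3] [c0, c1, c2, c3] =
    [ min (min (min (min (c0) (p0 + (if (a > b ∧ 0 < 0) ∨ (a < b ∧ 0 < 0) ∨ (a = b ∧ 0 = 0) then (0:Int) else 1))) (p1 + (if (a > b ∧ 1 < 0) ∨ (a < b ∧ 0 < 1) ∨ (a = b ∧ 0 = 1) then (0:Int) else 1))) (p2 + (if (a > b ∧ 2 < 0) ∨ (a < b ∧ 0 < 2) ∨ (a = b ∧ 0 = 2) then (0:Int) else 1))) (p3 + (if (a > b ∧ 3 < 0) ∨ (a < b ∧ 0 < 3) ∨ (a = b ∧ 0 = 3) then (0:Int) else 1)),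
      min (min (min (min (c1) (p0 + (if (a > b ∧ 0 < 1) ∨ (a < b ∧ 1 < 0) ∨ (a = b ∧ 1 = 0) then (0:Int) else 1))) (p1 + (if (a > b ∧ 1 < 1) ∨ (a < b ∧ 1 < 1) ∨ (a = b ∧ 1 = 1) then (0:Int) else 1))) (p2 + (if (a > b ∧ 2 < 1) ∨ (a < b ∧ 1 < 2) ∨ (a = b ∧ 1 = 2) then (0:Int) else 1))) (p3 + (if (a > b ∧ 3 < 1) ∨ (a < b ∧ 1 < 3) ∨ (a = b ∧ 1 = 3) then (0:Int) else 1)),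
      min (min (min (min (c2) (p0 + (if (a > b ∧ 0 < 2) ∨ (a < b ∧ 2 < 0) ∨ (a = b ∧ 2 = 0) then (0:Int) else 1))) (p1 + (if (a > b ∧ 1 < 2) ∨ (a < b ∧ 2 < 1) ∨ (a = b ∧ 2 = 1) then (0:Int) else 1))) (p2 + (if (a > b ∧ 2 < 2) ∨ (a < b ∧ 2 < 2) ∨ (a = b ∧ 2 = 2) then (0:Int) else 1))) (p3 + (if (a > b ∧ 3 < 2) ∨ (a < b ∧ 2 < 3) ∨ (a = b ∧ 2 = 3) then (0:Int) else 1)),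
      min (min (min (min (c3) (p0 + (if (a > b ∧ 0 < 3) ∨ (a < b ∧ 3 < 0) ∨ (a = b ∧ 3 = 0) then (0:Int) else 1))) (p1 + (if (a > b ∧ 1 < 3) ∨ (a < b ∧ 3 < 1) ∨ (a = b ∧ 3 = 1) then (0:Int) else 1))) (p2 + (if (a > b ∧ 2 < 3) ∨ (a < b ∧ 3 < 2) ∨ (a = b ∧ 3 = 2) then (0:Int) else 1))) (p3 + (if (a > b ∧ 3 < 3) ∨ (a < b ∧ 3 < 3) ∨ (a = b ∧ 3 = 3) then (0:Int) else 1)) ] := rfl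

set_option maxHeartbeats 1000000 in
lemma rowStep_eval (a b v lo hi KK : Int) (h0 : 0 ≤ lo) (hlh : lo ≤ hi) (h3 : hi ≤ 3)
    (hvK : v + 2 ≤ KK) :
    rowStep a b (rowOf v lo hi) [KK, KK, KK, KK] =
      rowOf (upd a b v lo hi).1 (upd a b v lo hi).2.1 (upd a b v lo hi).2.2 := by
  have hlo3 : lo ≤ 3 := le_trans hlh h3
  have hhi0 : 0 ≤ hi := le_trans h0 hlh
  rw [show rowOf v lo hi = [Rv v lo hi 0, Rv v lo hi 1, Rv v lo hi 2, Rv v lo hi 3] from rfl,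
    rowStep_explicit]
  rcases lt_trichotomy a b with h | h | h
  · interval_cases lo <;> interval_cases hi <;>
      (simp [upd, rowOf, Rv, h, h.ne, lt_asymm h]; omega)
  · subst h
    interval_cases lo <;> interval_cases hi <;>
      (simp [upd, rowOf, Rv]; omega)
  · interval_cases lo <;> interval_cases hi <;>
      (simp [upd, rowOf, Rv, h, h.ne', lt_asymm h]; omega)

-- the initial table: row 0 zeroed, all other rows [K,K,K,K]
def dpInit (K : Int) : List (List Int) :=
  (List.range 4).foldl (fun dp j => dpSet dp 0 j 0)
    ((PySem.List.pyRange 0 K 1).map (fun _ => (PySem.List.pyRange 0 4 1).map (fun _ => K)))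

lemma dpInit_eq (K : Int) (hK : 1 ≤ K) :
    dpInit K = rowOf 0 0 3 :: List.replicate (K.toNat - 1) [K, K, K, K] := by
  have hrow : (PySem.List.pyRange 0 4 1).map (fun _ : Int => K) = [K, K, K, K] := by
    rw [PySem.List.pyRange_one, show ((4 : Int) - 0).toNat = 4 from rfl]
    simp [List.range_succ]
  have hmap : (PySem.List.pyRange 0 K 1).map (fun _ : Int => (PySem.List.pyRange 0 4 1).map (fun _ : Int => K))
      = List.replicate K.toNat [K, K, K, K] := by
    simp only [hrow]
    rw [PySem.List.pyRange_one, List.map_const', List.length_map, List.length_range]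
    norm_num
  obtain ⟨n, hn⟩ : ∃ n, K.toNat = n + 1 := ⟨K.toNat - 1, by omega⟩
  unfold dpInit
  rw [hmap, hn, List.replicate_succ, range4]
  simp only [List.foldl_cons, List.foldl_nil, dpSet]
  norm_num [List.getD_cons_zero, List.set_cons_zero]
  decide

lemma getD_replicate' (n t : Nat) (r : List Int) (h : t < n) :
    (List.replicate n r).getD t [] = r := by
  simp [List.getD, List.getElem?_replicate, h]

-- A's table after the first m loop iterations / B's state after the same iterations
def dpA (K : Int) (notes : List Int) (m : Nat) : List (List Int) :=
  (List.range m).foldl (fun (dp : List (List Int)) (k : Nat) => bodyA notes (1 + (k : Int)) dp) (dpInit K)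
def stA (notes : List Int) (m : Nat) : Int × Int × Int :=
  (List.range m).foldl (fun (s : Int × Int × Int) (k : Nat) => stepB notes s (1 + (k : Int))) (0, 0, 3)

lemma master (K : Int) (notes : List Int) (hK : 1 ≤ K) :
    ∀ m : Nat, (m : Int) ≤ K - 1 →
    ∃ v lo hi : Int, stA notes m = (v, lo, hi)
      ∧ 0 ≤ lo ∧ lo ≤ hi ∧ hi ≤ 3 ∧ 0 ≤ v ∧ v ≤ (m : Int)
      ∧ (dpA K notes m).length = K.toNat
      ∧ (dpA K notes m).getD m [] = rowOf v lo hi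
      ∧ ∀ t : Nat, m < t → t < K.toNat → (dpA K notes m).getD t [] = [K, K, K, K] := by
  intro m
  induction m with
  | zero =>
    intro _
    refine ⟨0, 0, 3, rfl, by norm_num, by norm_num, by norm_num, by norm_num, by norm_num, ?_, ?_, ?_⟩
    · simp [dpA, dpInit_eq K hK]; omega
    · simp [dpA, dpInit_eq K hK]
    · intro t ht htK
      obtain ⟨s, hs⟩ : ∃ s, t = s + 1 := ⟨t - 1, by omega⟩
      simp only [dpA, List.foldl_nil, dpInit_eq K hK, hs, List.getD_cons_succ]
      exact getD_replicate' _ _ _ (by omega)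
  | succ m ih =>
    intro hm
    obtain ⟨v, lo, hi, hst, h0, hlh, h3, hv0, hvm, hlen, hprev, hrest⟩ :=
      ih (by push_cast at hm ⊢; omega)
    have hmK : m + 1 < K.toNat := by omega
    have hcur : (dpA K notes m).getD (m + 1) [] = [K, K, K, K] := hrest (m + 1) (by omega) hmK
    have hdp : dpA K notes (m + 1) = bodyA notes (1 + (m : Int)) (dpA K notes m) := by
      simp [dpA, List.range_succ]
    have hti : ((1 : Int) + (m : Int)).toNat = m + 1 := by omega
    have htp : ((1 : Int) + (m : Int) - 1).toNat = m := by omega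
    set a := noteAt notes (1 + (m : Int)) with ha
    set b := noteAt notes (1 + (m : Int) - 1) with hb
    have hbody : dpA K notes (m + 1)
        = (dpA K notes m).set (m + 1) (rowOf (upd a b v lo hi).1 (upd a b v lo hi).2.1 (upd a b v lo hi).2.2) := by
      rw [hdp, bodyA_eq notes _ _ (by omega), hti, htp, hprev, hcur,
        rowStep_eval a b v lo hi K h0 hlh h3 (by omega)]
    have hstep : stA notes (m + 1) = upd a b v lo hi := by
      simp only [stA, List.range_succ, List.foldl_append, List.foldl_cons, List.foldl_nil]
      rw [show (List.range m).foldl (fun (s : Int × Int × Int) (k : Nat) => stepB notes s (1 + (k : Int))) (0, 0, 3) = stA notes m from rfl,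
        hst, stepB_upd]
    obtain ⟨b0, blh, b3, bv, bv1⟩ := upd_bounds a b v lo hi h0 hlh h3
    refine ⟨(upd a b v lo hi).1, (upd a b v lo hi).2.1, (upd a b v lo hi).2.2,
      by rw [hstep], b0, blh, b3, by omega, by push_cast; omega, ?_, ?_, ?_⟩
    · rw [hbody, List.length_set, hlen]
    · rw [hbody]; exact getD_set_self' _ _ _ (by omega)
    · intro t ht htK
      rw [hbody, getD_set_ne' _ _ _ _ (by omega)]
      exact hrest t (by omega) htK

lemma rowOf_min (v lo hi : Int) (h0 : 0 ≤ lo) (hlh : lo ≤ hi) (h3 : hi ≤ 3) :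
    (PySem.List.min? (rowOf v lo hi) (fun y => y)).getD 0 = v := by
  rw [rowOf, PySem.List.min?_id_cons]
  simp only [Option.getD_some, List.foldl_cons, List.foldl_nil]
  have hlo3 : lo ≤ 3 := le_trans hlh h3
  have hhi0 : 0 ≤ hi := le_trans h0 hlh
  interval_cases lo <;> interval_cases hi <;> simp [Rv]

theorem solution_spec : Claim_equal_solution := by
  intro K notes _ hpre
  obtain ⟨hK, -⟩ := hpre
  have hm : (((K - 1).toNat : Nat) : Int) = K - 1 := Int.toNat_of_nonneg (by omega)
  obtain ⟨v, lo, hi, hst, h0, hlh, h3, hv0, hvm, hlen, hrow, -⟩ :=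
    master K notes hK (K - 1).toNat (by omega)
  have key : (PySem.List.pyRange 1 K 1).foldl (fun dp i => bodyA notes i dp) (dpInit K)
      = dpA K notes (K - 1).toNat := by
    rw [PySem.List.pyRange_one, List.foldl_map]
    rfl
  have hA := congrArg (fun dp2 => match PySem.List.pyGet? dp2 (-1) with
    | some row => (PySem.List.min? row (fun y => y)).getD 0
    | none => 0) key
  have hget : PySem.List.pyGet? (dpA K notes (K - 1).toNat) (-1) = some (rowOf v lo hi) := by
    rw [PySem.List.pyGet?_neg_one, List.getLast?_eq_getElem?]
    have hlt : (K - 1).toNat < (dpA K notes (K - 1).toNat).length := by omega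
    rw [show (dpA K notes (K - 1).toNat).length - 1 = (K - 1).toNat by omega]
    rw [List.getElem?_eq_getElem hlt, ← List.getD_eq_getElem _ [] hlt, hrow]
  have hBv : solution_alt K notes = v := by
    unfold solution_alt
    rw [PySem.List.pyRange_one, List.foldl_map]
    rw [show (List.range (K - 1).toNat).foldl
        (fun (s : Int × Int × Int) (k : Nat) => stepB notes s (1 + (k : Int))) (0, 0, 3)
        = stA notes (K - 1).toNat from rfl, hst]
  show solution K notes = solution_alt K notes
  rw [hBv]
  calc solution K notes
      = _ := hA
    _ = v := by
      simp only [hget]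
      exact rowOf_min v lo hi h0 hlh h3
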